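-- pv_equiv track=rewrite | github.com/Curtidor/JSONSpyglass | models/target_element.py | collect_attributes
-- ===== SOURCE A (Python) =====
-- from typing import Any, List, Dict, Generator
--
-- def collect_attributes(attributes: List[Dict[str, str]]) -> Dict[str, Any]:
--     """
--     Collect and format a list of attribute dictionaries into a consolidated dictionary.
--
--     Args:
--         attributes (List[Dict[str, str]): List of attribute dictionaries, where each dictionary
--             contains 'name' and 'value' keys for attribute names and values.
--
--     Returns:
--         Dict[str, Any]: A dictionary where attribute names are keys and corresponding values are
--             consolidated as space-separated strings.
--
--     This method takes a list of dictionaries where each dictionary contains 'name' and 'value' keys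
--     representing attribute names and values. It collects these attributes and consolidates values
--     for the same attribute name into space-separated strings within the returned dictionary.
--
--     Note:
--     The 'attributes' parameter should be a list of dictionaries, where each dictionary contains 'name' and 'value' keys.
--
--     Example:
--     attributes = [
--         {'name': 'class', 'value': 'btn'},
--         {'name': 'id', 'value': 'submit-button'},
--         {'name': 'class', 'value': 'active'}
--     ]
--     collect_attributes(attributes)
--     # Output: {'class': 'btn active', 'id': 'submit-button'}
--     """
--     attr = {}
--     for attribute in attributes:
--         name = attribute.get("name", "")
--         value = attribute.get("value", "None")
--
--         if not value or not name:
--             raise ValueError(f"Improperly formatted attributes, missing value or name: {attribute}")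
--
--         if name in attr:
--             attr[name].append(value)
--         else:
--             attr[name] = [value]
--
--     return {k: ' '.join(v) for k, v in attr.items()}
-- ===== SOURCE B (Python) =====
-- from typing import Any, List, Dict
--
-- def collect_attributes(attributes: List[Dict[str, str]]) -> Dict[str, Any]:
--     """Staged group-by: validate/extract pairs, take distinct names in first-occurrence
--     order, then for each name scan all pairs and join its values. No dict of lists."""
--     pairs = []
--     for attribute in attributes:
--         name = attribute.get("name", "")
--         value = attribute.get("value", "None")
--         if not value or not name:
--             raise ValueError(f"Improperly formatted attributes, missing value or name: {attribute}")
--         pairs.append((name, value))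
--
--     names = list(dict.fromkeys(n for n, _ in pairs))
--     return {n: " ".join(v for m, v in pairs if m == n) for n in names}
-- ===== Notes on version B (the rewrite author's own statement) =====
-- stated objective: alternative
-- what changed: B replaces A's incremental dict-of-lists accumulation with a staged group-by: extract the (name,value) pairs, dedup the names in first-occurrence order, then build each output entry by scanning all pairs for that name and joining; no dict of value lists is ever maintained.
import Mathlib
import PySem

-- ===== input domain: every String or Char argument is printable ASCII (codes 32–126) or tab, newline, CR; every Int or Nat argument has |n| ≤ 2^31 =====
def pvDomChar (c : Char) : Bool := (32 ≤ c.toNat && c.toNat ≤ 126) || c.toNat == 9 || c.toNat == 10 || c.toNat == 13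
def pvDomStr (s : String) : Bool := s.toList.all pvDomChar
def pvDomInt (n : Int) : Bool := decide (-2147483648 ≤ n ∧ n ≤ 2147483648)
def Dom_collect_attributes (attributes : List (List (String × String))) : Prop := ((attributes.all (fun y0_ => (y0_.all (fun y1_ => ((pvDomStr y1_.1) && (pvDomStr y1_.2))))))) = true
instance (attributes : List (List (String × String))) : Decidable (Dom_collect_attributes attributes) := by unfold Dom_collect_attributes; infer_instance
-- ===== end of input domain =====

-- B replaces A's incremental dict-of-lists with a staged group-by: extract the pairs,
-- dedup the names in first-occurrence order, then join each name's values by a scan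
-- over all pairs (objective: alternative).

-- ===== PORT A =====
-- one iteration of A's loop body (the ValueError guard cannot fire inside Pre_, so it adds nothing here)
def stepA (attr : PySem.Dict String (List String)) (attrib : List (String × String)) :
    PySem.Dict String (List String) :=
  let name := (PySem.Dict.mk attrib).getD "name" ""
  let value := (PySem.Dict.mk attrib).getD "value" "None"
  if attr.contains name then attr.modify name [] (fun v => v ++ [value])
  else attr.insert name [value]

def collect_attributes (attributes : List (List (String × String))) : List (String × String) :=
  let attr := attributes.foldl stepA PySem.Dict.empty
  (attr.items.map (fun p => (p.1, PySem.Str.join " " p.2)))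

-- ===== PORT B =====
-- the pairs-extraction loop of Source B is an append loop, i.e. a map (its ValueError guard
-- cannot fire inside Pre_); list(dict.fromkeys(...)) is PySem.List.dedup (first occurrences)
def collect_attributes_alt (attributes : List (List (String × String))) : List (String × String) :=
  let pairs := attributes.map (fun a =>
    ((PySem.Dict.mk a).getD "name" "", (PySem.Dict.mk a).getD "value" "None"))
  let names := PySem.List.dedup (pairs.map Prod.fst)
  names.map (fun n => (n, PySem.Str.join " " ((pairs.filter (fun p => p.1 == n)).map Prod.snd)))

-- ===== PRECONDITION & SPEC =====
-- Pre_ excludes exactly the inputs on which A raises ValueError: an attrib whose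
-- 'name' lookup is missing/empty or whose 'value' lookup is the empty string.
def Pre_collect_attributes (attributes : List (List (String × String))) : Prop :=
  ∀ attrib ∈ attributes,
    (PySem.Dict.mk attrib).getD "name" "" ≠ "" ∧
    (PySem.Dict.mk attrib).getD "value" "None" ≠ ""
instance (attributes : List (List (String × String))) : Decidable (Pre_collect_attributes attributes) := by unfold Pre_collect_attributes; infer_instance

def pvWitness_collect_attributes : (List (List (String × String))) :=
  [[("name", "class"), ("value", "btn")], [("name", "id"), ("value", "x")],
   [("name", "class"), ("value", "active")]]

def Spec_collect_attributes (attributes : List (List (String × String))) (out : List (String × String)) : Prop := out = collect_attributes_alt attributes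
instance (attributes : List (List (String × String))) (out : List (String × String)) : Decidable (Spec_collect_attributes attributes out) := by unfold Spec_collect_attributes; infer_instance

-- ===== CLAIM (what is proved, stated in full; the proofs are below) =====
def Claim_equal_collect_attributes : Prop := ∀ (attributes : List (List (String × String))), Dom_collect_attributes attributes → Pre_collect_attributes attributes → Spec_collect_attributes attributes (collect_attributes attributes)

-- ===== LEMMAS AND PROOFS =====

-- A's branching step is exactly the unconditional 'modify at the name' step
lemma stepA_eq_modify (d : PySem.Dict String (List String)) (a : List (String × String)) :
    stepA d a = d.modify ((PySem.Dict.mk a).getD "name" "") []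
      (fun v => v ++ [(PySem.Dict.mk a).getD "value" "None"]) := by
  unfold stepA
  dsimp only
  split_ifs with hc
  · rfl
  · have h0 : d.getD ((PySem.Dict.mk a).getD "name" "") ([] : List String) = [] := by
      apply PySem.Dict.getD_of_not_contains
      simpa using hc
    show _ = d.insert _ (d.getD _ [] ++ _)
    rw [h0]
    rfl

-- ===== VERDICT (by name: the statement is the Claim_ definition above) =====
theorem collect_attributes_spec : Claim_equal_collect_attributes := by
  intro attributes _ _
  unfold Spec_collect_attributes collect_attributes collect_attributes_alt
  set pairs : List (String × String) := attributes.map (fun a =>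
    ((PySem.Dict.mk a).getD "name" "", (PySem.Dict.mk a).getD "value" "None")) with hpairs
  have hfold : attributes.foldl stepA PySem.Dict.empty
      = pairs.foldl (fun d p => d.modify p.1 [] (fun v => v ++ [p.2])) PySem.Dict.empty := by
    rw [hpairs, List.foldl_map]
    congr 1
    funext d a
    exact stepA_eq_modify d a
  set F := pairs.foldl (fun d p => d.modify p.1 [] (fun v => v ++ [p.2])) PySem.Dict.empty with hF
  have hnd : F.keys.Nodup := by
    exact PySem.Dict.nodup_keys_foldl_modify_key pairs Prod.fst []
      (fun d p v => v ++ [p.2]) PySem.Dict.empty (by simp)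
  have hkeys : F.keys = PySem.List.dedup (pairs.map Prod.fst) := by
    rw [hF, PySem.Dict.keys_foldl_modify_key]
    simp [PySem.Dict.keys_empty, PySem.Set.update, PySem.List.dedup_eq_ofList, PySem.Set.ofList]
  have hitems : F.items = F.keys.map (fun k => (k, F.getD k [])) :=
    PySem.Dict.items_eq_map_keys F hnd []
  have hget : ∀ k, F.getD k [] = (pairs.filter (fun p => p.1 == k)).map Prod.snd := by
    intro k
    rw [hF, PySem.Dict.getD_foldl_modify_append, PySem.Dict.getD_empty]
    simp
  dsimp only
  rw [hfold, hitems, hkeys, List.map_map]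
  apply List.map_congr_left
  intro n _
  simp [hget n]
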